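-- pv_equiv track=rewrite | github.com/sivakumarmedidi/WorkArounds | DSA/Algos/DP/max_sum_subseq.py | maxSumSubSeq
-- ===== SOURCE A (Python) =====
-- def maxSumSubSeq(array):
--     if(not array):
--         return 0
--
--     if(len(array) == 1):
--         return array[0]
--
--     sum = maxSumSubSeq(array[1:])
--
--     if(array[0] > 0):
--         return sum + array[0]
--     else:
--         return sum
-- ===== SOURCE B (Python) =====
-- def maxSumSubSeq(array):
--     if not array:
--         return 0
--     total = array[-1]
--     for x in array[:-1]:
--         if x > 0:
--             total += x
--     return total
-- ===== Notes on version B (the rewrite author's own statement) =====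
-- stated objective: faster
-- what changed: Replaced the O(n^2) recursion (each step copies the tail with array[1:]) by a single iterative pass that sums the positive elements of array[:-1] and adds the last element unconditionally.
import Mathlib
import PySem

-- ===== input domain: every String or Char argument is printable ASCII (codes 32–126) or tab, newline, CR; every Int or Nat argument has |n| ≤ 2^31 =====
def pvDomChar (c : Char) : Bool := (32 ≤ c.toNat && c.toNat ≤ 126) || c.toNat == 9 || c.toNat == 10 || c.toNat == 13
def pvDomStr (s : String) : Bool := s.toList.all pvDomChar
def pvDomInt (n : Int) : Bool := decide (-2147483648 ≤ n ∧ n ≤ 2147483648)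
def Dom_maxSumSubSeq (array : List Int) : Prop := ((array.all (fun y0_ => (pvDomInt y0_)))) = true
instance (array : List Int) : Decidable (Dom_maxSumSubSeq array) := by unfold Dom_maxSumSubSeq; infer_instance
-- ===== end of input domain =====

-- B replaces A's O(n^2) tail-copying recursion with a single linear pass (sum positives of array[:-1], then add array[-1] unconditionally); proven equal on all inputs.
-- ===== PORT A =====
-- A: recursion on the tail (array[1:]), adding array[0] when positive.
def maxSumSubSeq (array : List Int) : Int :=
  match array with
  | [] => 0
  | [x] => x
  | x :: rest =>
      let sum := maxSumSubSeq rest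
      if x > 0 then sum + x else sum

-- ===== PORT B =====
-- B: one linear pass over array[:-1] accumulating positives, starting from array[-1].
def maxSumSubSeq_alt (array : List Int) : Int :=
  match array with
  | [] => 0
  | y :: ys =>
      (PySem.List.slice (y :: ys) none (some (-1))).foldl
        (fun total x => if x > 0 then total + x else total) ((y :: ys).getLast (by simp))

-- ===== PRECONDITION & SPEC =====
def Spec_maxSumSubSeq (array : List Int) (out : Int) : Prop := out = maxSumSubSeq_alt array
instance (array : List Int) (out : Int) : Decidable (Spec_maxSumSubSeq array out) := by unfold Spec_maxSumSubSeq; infer_instance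

-- ===== CLAIM (what is proved, stated in full; the proofs are below) =====
def Claim_equal_maxSumSubSeq : Prop := ∀ (array : List Int), Dom_maxSumSubSeq array → Spec_maxSumSubSeq array (maxSumSubSeq array)

-- ===== LEMMAS AND PROOFS =====

theorem pvFoldl_shift (l : List Int) (a : Int) :
    l.foldl (fun total x => if x > 0 then total + x else total) a
      = a + l.foldl (fun total x => if x > 0 then total + x else total) 0 := by
  induction l generalizing a with
  | nil => simp
  | cons x xs ih =>
    simp only [List.foldl_cons]
    rw [ih, ih (if x > 0 then 0 + x else 0)]
    split_ifs <;> ring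

theorem pvSlice_dropLast (l : List Int) :
    PySem.List.slice l none (some (-1)) = l.dropLast :=
  PySem.List.slice_to_neg_one l

theorem pvMain (l : List Int) (h : l ≠ []) :
    maxSumSubSeq l
      = l.dropLast.foldl (fun total x => if x > 0 then total + x else total) (l.getLast h) := by
  induction l with
  | nil => exact absurd rfl h
  | cons x xs ih =>
    cases xs with
    | nil => simp [maxSumSubSeq]
    | cons y ys =>
      have hne : (y :: ys) ≠ ([] : List Int) := by simp
      simp only [maxSumSubSeq]
      rw [ih hne]
      have hd : (x :: y :: ys).dropLast = x :: (y :: ys).dropLast := by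
        simp [List.dropLast]
      rw [hd, List.foldl_cons]
      have hl : (x :: y :: ys).getLast (by simp) = (y :: ys).getLast hne := by
        simp [List.getLast]
      rw [hl]
      rw [pvFoldl_shift _ ((y :: ys).getLast hne),
          pvFoldl_shift _ (if x > 0 then (y :: ys).getLast hne + x else (y :: ys).getLast hne)]
      split_ifs <;> ring

-- ===== VERDICT (by name: the statement is the Claim_ definition above) =====
theorem maxSumSubSeq_spec : Claim_equal_maxSumSubSeq := by
  intro array _
  unfold Spec_maxSumSubSeq
  cases array with
  | nil => simp [maxSumSubSeq, maxSumSubSeq_alt]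
  | cons y ys =>
    show maxSumSubSeq (y :: ys) = maxSumSubSeq_alt (y :: ys)
    rw [pvMain (y :: ys) (by simp)]
    simp only [maxSumSubSeq_alt, pvSlice_dropLast]
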